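-- pv_equiv track=rewrite | github.com/jvlewis/aoc | day-seventeen/conway_cubes.py | cycleCube3D
-- ===== SOURCE A (Python) =====
-- from collections import defaultdict
--
-- def cycleCube3D(cube):
--   stateRange = [-1, 0, 1]
--   nextState = defaultdict(int)
--   nextCube = defaultdict(int)
--
--   for pt in cube:
--     x = pt[0]
--     y = pt[1]
--     z = pt[2]
--
--     for nx in stateRange:
--       for ny in stateRange:
--         for nz in stateRange:
--           if nx == ny == nz == 0:
--             continue
--           nextState[(x+nx,y+ny,z+nz)] += 1
--   for pt in nextState:
--     if pt in cube and nextState[pt] in (2, 3):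
--       nextCube[pt] = '#'
--     elif pt not in cube and nextState[pt] == 3:
--       nextCube[pt] = '#'
--   return nextCube
-- ===== SOURCE B (Python) =====
-- from collections import defaultdict
--
-- def cycleCube3D(cube):
--   offsets = [(dx, dy, dz)
--              for dx in (-1, 0, 1) for dy in (-1, 0, 1) for dz in (-1, 0, 1)
--              if (dx, dy, dz) != (0, 0, 0)]
--   candidates = dict.fromkeys((x + dx, y + dy, z + dz)
--                              for x, y, z in cube
--                              for dx, dy, dz in offsets)
--   nextCube = defaultdict(int)
--   for c in candidates:
--     n = sum((c[0] + dx, c[1] + dy, c[2] + dz) in cube for dx, dy, dz in offsets)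
--     if n == 3 or (n == 2 and c in cube):
--       nextCube[c] = '#'
--   return nextCube
-- ===== Notes on version B (the rewrite author's own statement) =====
-- stated objective: alternative
-- what changed: A scatters: it accumulates a neighbor-count dict by incrementing all 26 neighbors of each active cell; B gathers: it builds the deduplicated candidate list once and computes each candidate's live-neighbor count on the fly by 26 membership tests against the input dict, never materialising a counter.
-- outside the precondition, e.g. on cycleCube3D({(0, 0, 0, 0): '#'}): A returns {}, B raises ValueError
import Mathlib
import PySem

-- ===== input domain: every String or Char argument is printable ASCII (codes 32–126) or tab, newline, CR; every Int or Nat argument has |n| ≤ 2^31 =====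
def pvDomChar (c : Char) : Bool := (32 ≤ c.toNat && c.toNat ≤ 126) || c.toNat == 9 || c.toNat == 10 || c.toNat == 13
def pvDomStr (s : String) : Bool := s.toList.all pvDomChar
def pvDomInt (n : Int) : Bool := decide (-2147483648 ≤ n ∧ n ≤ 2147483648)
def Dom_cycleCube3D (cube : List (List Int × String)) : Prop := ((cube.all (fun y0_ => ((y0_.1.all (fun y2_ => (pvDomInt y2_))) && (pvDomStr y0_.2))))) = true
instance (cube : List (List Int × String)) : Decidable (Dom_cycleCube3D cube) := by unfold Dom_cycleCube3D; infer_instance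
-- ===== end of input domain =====

-- B gathers instead of scattering: it deduplicates the neighbor stream into a candidate list once
-- and counts each candidate's live neighbors by 26 membership tests, with no counter dict.

-- ===== PORT A =====
def cycleCube3D (cube : List (List Int × String)) : List (List Int × String) :=
  let stateRange : List Int := [-1, 0, 1]
  let nextState : PySem.Dict (List Int) Int :=
    cube.foldl (fun st pt =>
      let x := (PySem.List.pyGet? pt.1 0).getD 0
      let y := (PySem.List.pyGet? pt.1 1).getD 0
      let z := (PySem.List.pyGet? pt.1 2).getD 0
      stateRange.foldl (fun st nx =>
        stateRange.foldl (fun st ny =>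
          stateRange.foldl (fun st nz =>
            if nx = 0 ∧ ny = 0 ∧ nz = 0 then st
            else st.modify [x + nx, y + ny, z + nz] 0 (· + 1)) st) st) st)
      PySem.Dict.empty
  let nextCube : PySem.Dict (List Int) String :=
    nextState.keys.foldl (fun nc pt =>
      if (cube.map Prod.fst).contains pt ∧ (nextState.getD pt 0 = 2 ∨ nextState.getD pt 0 = 3) then
        nc.insert pt "#"
      else if ¬ (cube.map Prod.fst).contains pt = true ∧ nextState.getD pt 0 = 3 then
        nc.insert pt "#"
      else nc) PySem.Dict.empty
  nextCube.items

-- ===== PORT B =====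
def cycleCube3D_alt (cube : List (List Int × String)) : List (List Int × String) :=
  let offsets : List (Int × Int × Int) :=
    ([-1, 0, 1] : List Int).flatMap (fun dx =>
      ([-1, 0, 1] : List Int).flatMap (fun dy =>
        ([-1, 0, 1] : List Int).filterMap (fun dz =>
          if (dx, dy, dz) = ((0 : Int), (0 : Int), (0 : Int)) then none
          else some (dx, dy, dz))))
  let candidates : List (List Int) :=
    PySem.List.dedup (cube.flatMap (fun pt =>
      match pt.1 with
      | [x, y, z] => offsets.map (fun o => [x + o.1, y + o.2.1, z + o.2.2])
      | _ => []))
  let nextCube : PySem.Dict (List Int) String :=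
    candidates.foldl (fun nc c =>
      let n : Int := (offsets.countP (fun o =>
        (cube.map Prod.fst).contains
          [(PySem.List.pyGet? c 0).getD 0 + o.1,
           (PySem.List.pyGet? c 1).getD 0 + o.2.1,
           (PySem.List.pyGet? c 2).getD 0 + o.2.2]) : Nat)
      if n = 3 ∨ (n = 2 ∧ (cube.map Prod.fst).contains c) then nc.insert c "#" else nc)
      PySem.Dict.empty
  nextCube.items

-- ===== PRECONDITION & SPEC =====
-- Pre_ restricts to the function's natural domain of 3-D points with distinct keys: A raises
-- IndexError on keys shorter than 3, silently reads only the first three coordinates of longer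
-- keys (outside the 3-D domain), and duplicate keys cannot occur in the Python dict argument.
def Pre_cycleCube3D (cube : List (List Int × String)) : Prop :=
  (∀ p ∈ cube, p.1.length = 3) ∧ (cube.map Prod.fst).Nodup
instance (cube : List (List Int × String)) : Decidable (Pre_cycleCube3D cube) := by
  unfold Pre_cycleCube3D; infer_instance
def pvWitness_cycleCube3D : (List (List Int × String)) :=
  [([0, 0, 0], "#"), ([0, 0, 1], "#"), ([0, 1, 0], "#")]
def Spec_cycleCube3D (cube : List (List Int × String)) (out : List (List Int × String)) : Prop := out = cycleCube3D_alt cube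
instance (cube : List (List Int × String)) (out : List (List Int × String)) : Decidable (Spec_cycleCube3D cube out) := by unfold Spec_cycleCube3D; infer_instance

-- ===== CLAIM (what is proved, stated in full; the proofs are below) =====
def Claim_equal_cycleCube3D : Prop := ∀ (cube : List (List Int × String)), Dom_cycleCube3D cube → Pre_cycleCube3D cube → Spec_cycleCube3D cube (cycleCube3D cube)


-- ===== LEMMAS AND PROOFS =====

/-- The 26 neighbor offsets, in the order A's triple loop visits them. -/
def pvOffs : List (Int × Int × Int) :=
  [(-1,-1,-1),(-1,-1,0),(-1,-1,1),(-1,0,-1),(-1,0,0),(-1,0,1),(-1,1,-1),(-1,1,0),(-1,1,1),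
   (0,-1,-1),(0,-1,0),(0,-1,1),(0,0,-1),(0,0,1),(0,1,-1),(0,1,0),(0,1,1),
   (1,-1,-1),(1,-1,0),(1,-1,1),(1,0,-1),(1,0,0),(1,0,1),(1,1,-1),(1,1,0),(1,1,1)]

theorem pvOffs_eq_flat :
    (([-1, 0, 1] : List Int).flatMap (fun dx =>
      ([-1, 0, 1] : List Int).flatMap (fun dy =>
        ([-1, 0, 1] : List Int).filterMap (fun dz =>
          if (dx, dy, dz) = ((0 : Int), (0 : Int), (0 : Int)) then none
          else some (dx, dy, dz))))) = pvOffs := by decide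

theorem pvOffs_nodup : pvOffs.Nodup := by decide

theorem pvOffs_map_neg : pvOffs.map (fun o => -o) = pvOffs.reverse := by decide

theorem neg_mem_pvOffs (o : Int × Int × Int) : -o ∈ pvOffs ↔ o ∈ pvOffs := by
  rw [← List.mem_map_of_injective neg_injective (l := pvOffs) (a := o), pvOffs_map_neg,
    List.mem_reverse]

/-- Key of a triple. -/
def pvKey (p : Int × Int × Int) : List Int := [p.1, p.2.1, p.2.2]

theorem pvKey_injective : Function.Injective pvKey := by
  rintro ⟨a, b, c⟩ ⟨d, e, f⟩ h
  simp [pvKey] at h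
  simp [h.1, h.2.1, h.2.2]

/-- Triple of a length-3 key (junk elsewhere). -/
def pvTri (l : List Int) : Int × Int × Int :=
  match l with
  | [x, y, z] => (x, y, z)
  | _ => (0, 0, 0)

/-- Triple-level neighbors. -/
def pvNbrsT (p : Int × Int × Int) : List (Int × Int × Int) := pvOffs.map (fun o => p + o)

/-- The neighbor stream at the triple level. -/
def pvStreamT (P : List (Int × Int × Int)) : List (Int × Int × Int) := P.flatMap pvNbrsT

/-- The neighbor-key stream both programs generate. -/
def pvStream (cube : List (List Int × String)) : List (List Int) :=
  cube.flatMap (fun pt => (pvNbrsT (pvTri pt.1)).map pvKey)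

/-- The triple view of the dict's keys. -/
def pvP (cube : List (List Int × String)) : List (Int × Int × Int) :=
  cube.map (fun pt => pvTri pt.1)

theorem pvStream_eq_map (cube : List (List Int × String)) :
    pvStream cube = (pvStreamT (pvP cube)).map pvKey := by
  simp [pvStream, pvStreamT, pvP, List.map_flatMap, List.flatMap_map]

theorem foldl3 {α β : Type} (g : Int → Int → Int → α) (upd : β → α → β) (st : β) :
    (([-1, 0, 1] : List Int).foldl (fun st nx =>
      (([-1, 0, 1] : List Int)).foldl (fun st ny =>
        (([-1, 0, 1] : List Int)).foldl (fun st nz =>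
          if nx = 0 ∧ ny = 0 ∧ nz = 0 then st
          else upd st (g nx ny nz)) st) st) st) =
    (pvOffs.map (fun o => g o.1 o.2.1 o.2.2)).foldl upd st := by
  norm_num [pvOffs]

theorem count_nbrsT (p c : Int × Int × Int) :
    (pvNbrsT p).count c = if c - p ∈ pvOffs then 1 else 0 := by
  by_cases h : c - p ∈ pvOffs
  · have hc : c = p + (c - p) := by ring
    rw [if_pos h, pvNbrsT, hc, List.count_map_of_injective _ _ (add_right_injective p)]
    exact List.count_eq_one_of_mem pvOffs_nodup h
  · rw [if_neg h, List.count_eq_zero, pvNbrsT]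
    intro hc
    obtain ⟨o, ho, hoe⟩ := List.mem_map.mp hc
    have hco : c - p = o := by rw [← hoe]; ring
    exact h (hco ▸ ho)

theorem count_streamT (P : List (Int × Int × Int)) (c : Int × Int × Int) :
    (pvStreamT P).count c = P.countP (fun p => decide (c - p ∈ pvOffs)) := by
  induction P with
  | nil => simp [pvStreamT]
  | cons p P ih =>
    rw [pvStreamT, List.flatMap_cons, List.count_append, ← pvStreamT, ih,
      List.countP_cons, count_nbrsT]
    by_cases h : c - p ∈ pvOffs
    · simp [h]
      omega
    · simp [h]

theorem count_exchange (P : List (Int × Int × Int)) (hP : P.Nodup) (c : Int × Int × Int) :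
    P.countP (fun p => decide (c - p ∈ pvOffs)) =
      pvOffs.countP (fun o => decide (c + o ∈ P)) := by
  have hperm : (P.filter (fun p => decide (c - p ∈ pvOffs))).Perm
      ((pvOffs.filter (fun o => decide (c + o ∈ P))).map (fun o => c + o)) := by
    rw [List.perm_ext_iff_of_nodup (hP.filter _)
      ((pvOffs_nodup.filter _).map (add_right_injective c))]
    intro x
    simp only [List.mem_filter, List.mem_map, decide_eq_true_eq]
    constructor
    · rintro ⟨hxP, hxo⟩
      refine ⟨x - c, ⟨?_, by simpa using hxP⟩, by ring⟩
      rw [← neg_mem_pvOffs]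
      simpa using hxo
    · rintro ⟨o, ⟨ho, hoP⟩, rfl⟩
      refine ⟨hoP, ?_⟩
      have hco : c - (c + o) = -o := by ring
      rw [hco, neg_mem_pvOffs]
      exact ho
  rw [List.countP_eq_length_filter, List.countP_eq_length_filter, hperm.length_eq,
    List.length_map]

/-- The count both programs attach to a candidate, as an abstract function. -/
def pvCnt (cube : List (List Int × String)) (c : List Int) : Int :=
  ((pvStream cube).count c : Int)

/-- Common normal form of both programs' final loop. -/
def pvResult (cube : List (List Int × String)) : List (List Int × String) :=
  ((PySem.Set.ofList (pvStream cube)).foldl (fun nc c =>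
    if (cube.map Prod.fst).contains c ∧ (pvCnt cube c = 2 ∨ pvCnt cube c = 3) then
      nc.insert c "#"
    else if ¬ (cube.map Prod.fst).contains c = true ∧ pvCnt cube c = 3 then
      nc.insert c "#"
    else nc) PySem.Dict.empty).items

theorem nbrs_key (x y z : Int) :
    pvOffs.map (fun o => [x + o.1, y + o.2.1, z + o.2.2]) =
      (pvNbrsT (x, y, z)).map pvKey := by
  rw [pvNbrsT, List.map_map]
  rfl

theorem pvKey_add (a b g : Int) (o : Int × Int × Int) :
    pvKey ((a, b, g) + o) = [a + o.1, b + o.2.1, g + o.2.2] := rfl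

theorem key_eq_pvKey (cube : List (List Int × String))
    (hlen : ∀ p ∈ cube, p.1.length = 3) :
    cube.map Prod.fst = (pvP cube).map pvKey := by
  rw [pvP, List.map_map]
  apply List.map_congr_left
  intro pt hpt
  obtain ⟨x, y, z, hxyz⟩ := List.length_eq_three.mp (hlen pt hpt)
  simp [hxyz, pvTri, pvKey]

theorem contains_pvKey (cube : List (List Int × String))
    (hlen : ∀ p ∈ cube, p.1.length = 3) (u : Int × Int × Int) :
    (cube.map Prod.fst).contains (pvKey u) = decide (u ∈ pvP cube) := by
  rw [key_eq_pvKey cube hlen]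
  by_cases h : u ∈ pvP cube <;>
    simp [h, List.mem_map_of_injective pvKey_injective]

theorem cnt_eq (cube : List (List Int × String))
    (hlen : ∀ p ∈ cube, p.1.length = 3) (hnd : (cube.map Prod.fst).Nodup)
    (t : Int × Int × Int) :
    pvCnt cube (pvKey t) =
      (pvOffs.countP (fun o => (cube.map Prod.fst).contains (pvKey (t + o))) : Int) := by
  have hPnd : (pvP cube).Nodup :=
    List.Nodup.of_map pvKey ((key_eq_pvKey cube hlen) ▸ hnd)
  rw [pvCnt, pvStream_eq_map, List.count_map_of_injective _ _ pvKey_injective,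
    count_streamT, count_exchange _ hPnd]
  congr 1
  apply List.countP_congr
  intro o _
  rw [contains_pvKey cube hlen]

theorem mem_stream_shape (cube : List (List Int × String)) (c : List Int)
    (hc : c ∈ pvStream cube) : ∃ t, c = pvKey t := by
  rw [pvStream_eq_map] at hc
  obtain ⟨t, _, rfl⟩ := List.mem_map.mp hc
  exact ⟨t, rfl⟩

/-- Port A computes the common normal form. -/
theorem A_eq_result (cube : List (List Int × String))
    (hlen : ∀ p ∈ cube, p.1.length = 3) : cycleCube3D cube = pvResult cube := by
  simp only [cycleCube3D]
  have hstate : cube.foldl (fun st pt =>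
      (([-1, 0, 1] : List Int)).foldl (fun st nx =>
        (([-1, 0, 1] : List Int)).foldl (fun st ny =>
          (([-1, 0, 1] : List Int)).foldl (fun st nz =>
            if nx = 0 ∧ ny = 0 ∧ nz = 0 then st
            else st.modify [(PySem.List.pyGet? pt.1 0).getD 0 + nx,
              (PySem.List.pyGet? pt.1 1).getD 0 + ny,
              (PySem.List.pyGet? pt.1 2).getD 0 + nz] 0 (· + 1)) st) st) st)
      (PySem.Dict.empty : PySem.Dict (List Int) Int) =
      (pvStream cube).foldl (fun d k => d.modify k 0 (· + 1)) PySem.Dict.empty := by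
    rw [pvStream, List.foldl_flatMap]
    apply PySem.List.foldl_congr_mem
    intro st pt hpt
    obtain ⟨x, y, z, hxyz⟩ := List.length_eq_three.mp (hlen pt hpt)
    simp only [hxyz]
    have h0 : (PySem.List.pyGet? [x, y, z] (0 : Int)).getD 0 = x := rfl
    have h1 : (PySem.List.pyGet? [x, y, z] (1 : Int)).getD 0 = y := rfl
    have h2 : (PySem.List.pyGet? [x, y, z] (2 : Int)).getD 0 = z := rfl
    rw [h0, h1, h2,
      foldl3 (fun nx ny nz => [x + nx, y + ny, z + nz]) (fun d k => d.modify k 0 (· + 1)) st,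
      nbrs_key]
    simp [pvTri]
  simp only [hstate]
  have hkeys : ((pvStream cube).foldl (fun d k => d.modify k 0 (· + 1))
      (PySem.Dict.empty : PySem.Dict (List Int) Int)).keys = PySem.Set.ofList (pvStream cube) := by
    rw [PySem.Dict.keys_foldl_modify (f := fun _ _ => (· + 1))]
    simp [PySem.Set.update_nil_left]
  have hgetD : ∀ c, ((pvStream cube).foldl (fun d k => d.modify k 0 (· + 1))
      (PySem.Dict.empty : PySem.Dict (List Int) Int)).getD c 0 = pvCnt cube c := by
    intro c
    rw [PySem.Dict.getD_foldl_modify_add_one]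
    simp [pvCnt]
  simp only [hkeys, hgetD]
  rfl

/-- Port B computes the common normal form. -/
theorem B_eq_result (cube : List (List Int × String))
    (hlen : ∀ p ∈ cube, p.1.length = 3) (hnd : (cube.map Prod.fst).Nodup) :
    cycleCube3D_alt cube = pvResult cube := by
  simp only [cycleCube3D_alt]
  simp only [pvOffs_eq_flat]
  have hcand : cube.flatMap (fun pt =>
      match pt.1 with
      | [x, y, z] => pvOffs.map (fun o => [x + o.1, y + o.2.1, z + o.2.2])
      | _ => []) = pvStream cube := by
    rw [pvStream]
    apply List.flatMap_congr
    intro pt hpt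
    obtain ⟨x, y, z, hxyz⟩ := List.length_eq_three.mp (hlen pt hpt)
    simp only [hxyz, nbrs_key]
    simp [pvTri]
  simp only [hcand, PySem.List.dedup_eq_ofList]
  rw [pvResult]
  congr 1
  apply PySem.List.foldl_congr_mem
  intro nc c hcK
  obtain ⟨⟨a, b, g⟩, rfl⟩ :=
    mem_stream_shape cube c ((PySem.Set.mem_ofList _ _).mp hcK)
  have hget0 : (PySem.List.pyGet? (pvKey (a, b, g)) (0 : Int)).getD 0 = a := rfl
  have hget1 : (PySem.List.pyGet? (pvKey (a, b, g)) (1 : Int)).getD 0 = b := rfl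
  have hget2 : (PySem.List.pyGet? (pvKey (a, b, g)) (2 : Int)).getD 0 = g := rfl
  simp only [hget0, hget1, hget2, ← pvKey_add]
  rw [← cnt_eq cube hlen hnd]
  by_cases hcont : (cube.map Prod.fst).contains (pvKey (a, b, g)) = true <;>
    split_ifs <;> simp_all

-- ===== VERDICT (by name: the statement is the Claim_ definition above) =====
theorem cycleCube3D_spec : Claim_equal_cycleCube3D := by
  intro cube _hdom hpre
  obtain ⟨hlen, hnd⟩ := hpre
  show cycleCube3D cube = cycleCube3D_alt cube
  rw [A_eq_result cube hlen, B_eq_result cube hlen hnd]
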